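-- pv_equiv track=rewrite | github.com/Alex-Soong/PVD_Write | PVD_write.py | calcuSize
-- ===== SOURCE A (Python) =====
-- def calcuSize(_p1, _p2):
--     ranks = [[0, 7], [8, 15], [16, 31], [32, 63], [64, 127], [128, 255]]
--     logs = [3, 3, 4, 5, 6, 7]
--     d = _p2 - _p1
--     if d < 0:
--         d = -d
--     for i in range(6):
--         if d >= ranks[i][0] and d <= ranks[i][1]:
--             return (logs[i], ranks[i][0])
--     return (0, 0)
-- ===== SOURCE B (Python) =====
-- def calcuSize(_p1, _p2):
--     d = abs(_p2 - _p1)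
--     if d <= 7:
--         return (3, 0)
--     if d <= 255:
--         bl = d.bit_length()
--         return (bl - 1, 1 << (bl - 1))
--     return (0, 0)
-- ===== Notes on version B (the rewrite author's own statement) =====
-- stated objective: idiomatic
-- what changed: Replaced the six-entry ranks/logs table scan with a closed-form bit_length computation over the power-of-two bands.
import Mathlib
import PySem

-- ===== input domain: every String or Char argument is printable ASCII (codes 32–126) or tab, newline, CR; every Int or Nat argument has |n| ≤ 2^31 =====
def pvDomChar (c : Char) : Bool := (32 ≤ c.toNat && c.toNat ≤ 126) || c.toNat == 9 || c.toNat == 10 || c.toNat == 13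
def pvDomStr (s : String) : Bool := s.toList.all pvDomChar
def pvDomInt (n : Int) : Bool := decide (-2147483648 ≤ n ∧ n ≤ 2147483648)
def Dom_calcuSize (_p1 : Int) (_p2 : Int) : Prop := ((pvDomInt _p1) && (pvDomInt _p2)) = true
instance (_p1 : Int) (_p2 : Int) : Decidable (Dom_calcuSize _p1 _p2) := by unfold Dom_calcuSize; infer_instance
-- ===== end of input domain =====

-- B replaces A's six-entry ranks/logs table scan with a closed-form bit_length computation (idiomatic; same O(1) cost).

-- ===== PORT A =====
-- A's 'for i in range(6)' loop with early return: scan the (rank, log) rows in order,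
-- returning at the first row whose interval contains d; (0, 0) if the loop finishes.
def calcuSizeScan (d : Int) : List ((Int × Int) × Int) → Int × Int
  | [] => (0, 0)
  | ((lo, hi), lg) :: rest =>
    if d ≥ lo ∧ d ≤ hi then (lg, lo) else calcuSizeScan d rest

def calcuSize (_p1 : Int) (_p2 : Int) : Int × Int :=
  let ranks : List (Int × Int) := [(0, 7), (8, 15), (16, 31), (32, 63), (64, 127), (128, 255)]
  let logs : List Int := [3, 3, 4, 5, 6, 7]
  let d0 := _p2 - _p1
  let d := if d0 < 0 then -d0 else d0
  calcuSizeScan d (ranks.zip logs)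

-- ===== PORT B =====
-- d.bit_length() for a nonnegative int is Nat.size.
def calcuSize_alt (_p1 : Int) (_p2 : Int) : Int × Int :=
  let d : Nat := (_p2 - _p1).natAbs
  if d ≤ 7 then (3, 0)
  else if d ≤ 255 then
    let bl : Nat := Nat.size d
    ((bl : Int) - 1, ((2 ^ (bl - 1) : Nat) : Int))
  else (0, 0)

-- ===== PRECONDITION & SPEC =====
def Spec_calcuSize (_p1 : Int) (_p2 : Int) (out : Int × Int) : Prop := out = calcuSize_alt _p1 _p2
instance (_p1 : Int) (_p2 : Int) (out : Int × Int) : Decidable (Spec_calcuSize _p1 _p2 out) := by unfold Spec_calcuSize; infer_instance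

-- ===== CLAIM (what is proved, stated in full; the proofs are below) =====
def Claim_equal_calcuSize : Prop := ∀ (_p1 : Int) (_p2 : Int), Dom_calcuSize _p1 _p2 → Spec_calcuSize _p1 _p2 (calcuSize _p1 _p2)

-- ===== LEMMAS AND PROOFS =====

lemma size_eq_of_band (n k : Nat) (h1 : 2 ^ k ≤ n) (h2 : n < 2 ^ (k + 1)) :
    Nat.size n = k + 1 :=
  le_antisymm (Nat.size_le.2 h2) (Nat.lt_size.2 h1)

lemma calcuSize_agree (n : Nat) :
    calcuSizeScan (n : Int) [((0, 7), 3), ((8, 15), 3), ((16, 31), 4), ((32, 63), 5),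
      ((64, 127), 6), ((128, 255), 7)] =
    (if n ≤ 7 then ((3 : Int), (0 : Int))
     else if n ≤ 255 then
       let bl : Nat := Nat.size n
       ((bl : Int) - 1, ((2 ^ (bl - 1) : Nat) : Int))
     else (0, 0)) := by
  simp only [calcuSizeScan]
  by_cases h7 : n ≤ 7
  · rw [if_pos (by omega : (n : Int) ≥ 0 ∧ (n : Int) ≤ 7), if_pos h7]
  · rw [if_neg (by omega : ¬((n : Int) ≥ 0 ∧ (n : Int) ≤ 7)), if_neg h7]
    by_cases h255 : n ≤ 255
    · rw [if_pos h255]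
      by_cases h15 : n ≤ 15
      · rw [if_pos (by omega : (n : Int) ≥ 8 ∧ (n : Int) ≤ 15)]
        rw [size_eq_of_band n 3 (by omega) (by omega)]
        norm_num
      · rw [if_neg (by omega : ¬((n : Int) ≥ 8 ∧ (n : Int) ≤ 15))]
        by_cases h31 : n ≤ 31
        · rw [if_pos (by omega : (n : Int) ≥ 16 ∧ (n : Int) ≤ 31)]
          rw [size_eq_of_band n 4 (by omega) (by omega)]
          norm_num
        · rw [if_neg (by omega : ¬((n : Int) ≥ 16 ∧ (n : Int) ≤ 31))]
          by_cases h63 : n ≤ 63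
          · rw [if_pos (by omega : (n : Int) ≥ 32 ∧ (n : Int) ≤ 63)]
            rw [size_eq_of_band n 5 (by omega) (by omega)]
            norm_num
          · rw [if_neg (by omega : ¬((n : Int) ≥ 32 ∧ (n : Int) ≤ 63))]
            by_cases h127 : n ≤ 127
            · rw [if_pos (by omega : (n : Int) ≥ 64 ∧ (n : Int) ≤ 127)]
              rw [size_eq_of_band n 6 (by omega) (by omega)]
              norm_num
            · rw [if_neg (by omega : ¬((n : Int) ≥ 64 ∧ (n : Int) ≤ 127))]
              rw [if_pos (by omega : (n : Int) ≥ 128 ∧ (n : Int) ≤ 255)]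
              rw [size_eq_of_band n 7 (by omega) (by omega)]
              norm_num
    · rw [if_neg h255]
      rw [if_neg (by omega : ¬((n : Int) ≥ 8 ∧ (n : Int) ≤ 15))]
      rw [if_neg (by omega : ¬((n : Int) ≥ 16 ∧ (n : Int) ≤ 31))]
      rw [if_neg (by omega : ¬((n : Int) ≥ 32 ∧ (n : Int) ≤ 63))]
      rw [if_neg (by omega : ¬((n : Int) ≥ 64 ∧ (n : Int) ≤ 127))]
      rw [if_neg (by omega : ¬((n : Int) ≥ 128 ∧ (n : Int) ≤ 255))]

-- ===== VERDICT (by name: the statement is the Claim_ definition above) =====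
theorem calcuSize_spec : Claim_equal_calcuSize := by
  intro p1 p2 _
  unfold Spec_calcuSize calcuSize calcuSize_alt
  have habs : (if p2 - p1 < 0 then -(p2 - p1) else p2 - p1) = ((p2 - p1).natAbs : Int) := by
    split <;> omega
  simp only [habs, List.zip]
  exact calcuSize_agree (p2 - p1).natAbs
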